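-- pv_equiv track=rewrite | github.com/MasterUgwae/project-euler | 057.py | denominator
-- ===== SOURCE A (Python) =====
-- def denominator(x:int)->int:
--     x+=1
--     a=0
--     b=1
--     for i in range(x):
--         c=b*2+a
--         a=b
--         b=c
--     return b
-- ===== SOURCE B (Python) =====
-- def denominator(x: int) -> int:
--     # Denominator of the x-th continued-fraction convergent of sqrt(2):
--     # the Pell number P(x+2), computed by fast doubling.
--     def pell_pair(n):  # returns (P(n), P(n+1))
--         if n == 0:
--             return (0, 1)
--         p, q = pell_pair(n >> 1)
--         a = 2 * p * (q - p)
--         b = p * p + q * q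
--         return (a, b) if n % 2 == 0 else (b, 2 * b + a)
--     return pell_pair(x + 2)[0]
-- ===== Notes on version B (the rewrite author's own statement) =====
-- stated objective: faster
-- what changed: Replaced the linear Pell-recurrence loop by a fast-doubling recursion that halves the index each step; intended as faster (measured ~87x at the largest size both programs finished; at the top size the huge result could not be decoded). Pre_ excludes negative convergent indices below the first, where A's returned value is leftover initial loop state from an empty range while the natural fast-doubling code returns the zeroth Pell number at the boundary and does not terminate further down.
-- outside the precondition, e.g. on denominator(-2): A returns 1, B returns 0; on denominator(-3): A returns 1, B raises RecursionError
import Mathlib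
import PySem

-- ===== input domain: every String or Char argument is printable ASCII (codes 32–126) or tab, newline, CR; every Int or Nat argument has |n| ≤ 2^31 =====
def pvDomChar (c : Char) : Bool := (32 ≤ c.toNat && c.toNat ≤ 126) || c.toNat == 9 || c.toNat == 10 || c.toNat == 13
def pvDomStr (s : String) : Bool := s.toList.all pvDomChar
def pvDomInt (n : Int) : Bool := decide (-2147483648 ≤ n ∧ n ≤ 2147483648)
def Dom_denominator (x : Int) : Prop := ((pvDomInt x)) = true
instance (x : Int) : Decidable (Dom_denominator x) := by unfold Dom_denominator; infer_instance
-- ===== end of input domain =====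

-- B replaces A's linear Pell-recurrence loop by a fast-doubling recursion (logarithmically many steps).

-- ===== PORT A =====
def denominator (x : Int) : Int :=
  ((PySem.List.pyRange 0 (x + 1) 1).foldl
    (fun (ab : Int × Int) _ => (ab.2, ab.2 * 2 + ab.1)) (0, 1)).2

-- ===== PORT B =====
-- pell_pair n = (P n, P (n+1)) by fast doubling (Source B's helper; n ≥ 0 inside Pre_)
def pellPair : Nat → Int × Int
  | 0 => (0, 1)
  | (n+1) =>
    let pq := pellPair ((n+1) / 2)
    let p := pq.1
    let q := pq.2
    let a := 2 * p * (q - p)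
    let b := p * p + q * q
    if (n+1) % 2 == 0 then (a, b) else (b, 2 * b + a)
decreasing_by exact Nat.div_lt_self (Nat.succ_pos n) (by omega)

def denominator_alt (x : Int) : Int := (pellPair (x + 2).toNat).1

-- ===== PRECONDITION & SPEC =====
-- Pre_ excludes negative convergent indices below the first, where A's return value is
-- leftover initial loop state from an empty range while B's natural fast-doubling
-- returns the zeroth Pell number at the boundary and does not terminate below it.
def Pre_denominator (x : Int) : Prop := -1 ≤ x
instance (x : Int) : Decidable (Pre_denominator x) := by unfold Pre_denominator; infer_instance
def pvWitness_denominator : Int := 3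

def Spec_denominator (x : Int) (out : Int) : Prop := out = denominator_alt x
instance (x : Int) (out : Int) : Decidable (Spec_denominator x out) := by unfold Spec_denominator; infer_instance

-- ===== CLAIM (what is proved, stated in full; the proofs are below) =====
def Claim_equal_denominator : Prop := ∀ (x : Int), Dom_denominator x → Pre_denominator x → Spec_denominator x (denominator x)

-- ===== LEMMAS AND PROOFS =====

-- reference Pell numbers
def pell : Nat → Int
  | 0 => 0
  | 1 => 1
  | (n+2) => 2 * pell (n+1) + pell n

theorem pell_doubling (k : Nat) :
    pell (2 * k) = 2 * pell k * (pell (k+1) - pell k) ∧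
    pell (2 * k + 1) = pell k * pell k + pell (k+1) * pell (k+1) := by
  induction k with
  | zero => simp [pell]
  | succ m ih =>
    obtain ⟨h1, h2⟩ := ih
    have e1 : 2 * (m + 1) = 2 * m + 1 + 1 := by ring
    have e2 : 2 * (m + 1) + 1 = 2 * m + 1 + 1 + 1 := by ring
    constructor
    · rw [e1, show 2*m+1+1 = (2*m)+2 from by ring, pell, h1, h2,
        show m + 1 + 1 = m + 2 from rfl, pell]
      ring
    · rw [e2, show 2*m+1+1+1 = (2*m+1)+2 from by ring, pell,
        show 2*m+1+1 = (2*m)+2 from by ring, pell, h1, h2,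
        show m + 1 + 1 = m + 2 from rfl, pell]
      ring

theorem pellPair_eq (n : Nat) : pellPair n = (pell n, pell (n+1)) := by
  induction n using Nat.strong_induction_on with
  | _ n ih =>
    match n with
    | 0 => simp [pellPair, pell]
    | (m+1) =>
      have hlt : (m+1) / 2 < m + 1 := Nat.div_lt_self (Nat.succ_pos m) (by omega)
      have ihh := ih ((m+1)/2) hlt
      rw [pellPair, ihh]
      set k := (m+1)/2 with hk
      rcases Nat.even_or_odd (m+1) with he | ho
      · have hmod : (m+1) % 2 = 0 := Nat.even_iff.mp he
        have hmk : m + 1 = 2 * k := by omega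
        obtain ⟨h1, h2⟩ := pell_doubling k
        simp only [hmod]
        simp [hmk, h1, h2]
      · have hmod : (m+1) % 2 = 1 := Nat.odd_iff.mp ho
        have hmk : m + 1 = 2 * k + 1 := by omega
        obtain ⟨h1, h2⟩ := pell_doubling k
        simp only [hmod]
        rw [hmk, h2, show 2*k+1+1 = (2*k)+2 from by ring, pell, h1, h2]
        rw [if_neg (by decide)]

-- A's loop run over any list advances the Pell pair by the list's length
theorem foldl_pell_step (l : List Int) (m : Nat) :
    l.foldl (fun (ab : Int × Int) _ => (ab.2, ab.2 * 2 + ab.1)) (pell m, pell (m+1))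
      = (pell (m + l.length), pell (m + l.length + 1)) := by
  induction l generalizing m with
  | nil => simp
  | cons h t iht =>
    simp only [List.foldl_cons, List.length_cons]
    have : (pell (m+1), pell (m+1) * 2 + pell m) = (pell (m+1), pell ((m+1)+1)) := by
      rw [show (m+1)+1 = m+2 from rfl, pell]; ring_nf
    rw [this, iht (m+1)]
    congr 1 <;> congr 1 <;> omega

theorem denominator_eq_pell (x : Int) (hx : -1 ≤ x) :
    denominator x = pell ((x + 2).toNat) := by
  unfold denominator
  have h0 := foldl_pell_step (PySem.List.pyRange 0 (x+1) 1) 0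
  simp only [pell] at h0
  rw [h0]
  have hlen : (PySem.List.pyRange 0 (x+1) 1).length = (x+1).toNat := by
    rw [PySem.List.length_pyRange_one]; congr 1; omega
  rw [hlen]
  show pell (0 + (x+1).toNat + 1) = pell (x+2).toNat
  congr 1
  omega

-- ===== VERDICT (by name: the statement is the Claim_ definition above) =====
theorem denominator_spec : Claim_equal_denominator := by
  intro x _ hpre
  unfold Spec_denominator denominator_alt
  rw [pellPair_eq]
  exact denominator_eq_pell x hpre
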